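-- pv_equiv track=rewrite | github.com/luyangliuable/coding-notes | algorithms/leetcode/search_2d_matrix.py | specialBinarySearch
-- ===== SOURCE A (Python) =====
-- def specialBinarySearch(arr, target):
--     # Returns the possible the target is in by getting the closest row and the row before it.
--
--     lo = 0
--     hi = len(arr) - 1
--
--     while lo <= hi:
--         mid = lo + (hi - lo)//2
--
--         if arr[mid] == target:
--             return mid
--         elif mid + 1 < len(arr) and arr[mid] < target and arr[mid + 1] > target:
--             return mid
--         elif mid + 1 == len(arr) and arr[mid] <= target: # condition for the last row
--             return mid
--         elif arr[mid] < target: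
--             lo = mid + 1
--         else:
--             hi = mid - 1
--
--     return -1
-- ===== SOURCE B (Python) =====
-- def specialBinarySearch(arr, target):
--     # Recursive divide-and-conquer formulation with nested branching:
--     # the three "return mid" cases collapse into equality / floor-row tests.
--     def go(lo, hi):
--         if lo > hi:
--             return -1
--         mid = (lo + hi) // 2
--         v = arr[mid]
--         if v == target:
--             return mid
--         if v < target:
--             if mid + 1 == len(arr) or arr[mid + 1] > target:
--                 return mid
--             return go(mid + 1, hi)
--         return go(lo, mid - 1)
--     return go(0, len(arr) - 1)
-- ===== Notes on version B (the rewrite author's own statement) =====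
-- stated objective: alternative
-- what changed: The iterative while-loop with a flat four-way elif chain is recast as a recursive inner function go(lo, hi) whose branches are restructured: the two 'gap'/'last row' returns collapse into one nested test (mid+1 == len(arr) or arr[mid+1] > target) under arr[mid] < target, and the midpoint is computed as (lo+hi)//2.
import Mathlib
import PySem

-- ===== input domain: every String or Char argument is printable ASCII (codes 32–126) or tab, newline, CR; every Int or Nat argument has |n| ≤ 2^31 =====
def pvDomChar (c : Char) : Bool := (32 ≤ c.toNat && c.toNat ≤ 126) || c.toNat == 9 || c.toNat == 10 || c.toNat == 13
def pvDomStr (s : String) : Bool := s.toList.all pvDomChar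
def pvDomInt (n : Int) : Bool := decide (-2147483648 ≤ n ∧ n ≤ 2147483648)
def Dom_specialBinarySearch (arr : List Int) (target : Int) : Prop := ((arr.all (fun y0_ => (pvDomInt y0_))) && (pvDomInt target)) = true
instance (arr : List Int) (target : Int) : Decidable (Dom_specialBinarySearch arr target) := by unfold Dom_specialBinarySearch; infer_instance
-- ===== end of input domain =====

-- B recasts A's while-loop as a recursive helper with nested branching; objective: alternative (same cost).

-- ===== PORT A =====
-- A's while-loop over (lo, hi); indices are always in range in the loop, so arr[mid] is pyGetD.
def pvALoop (arr : List Int) (target lo hi : Int) : Int :=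
  if _h : lo ≤ hi then
    let mid := lo + PySem.Int.floordiv (hi - lo) 2
    if PySem.List.pyGetD arr mid 0 = target then mid
    else if mid + 1 < (arr.length : Int) ∧ PySem.List.pyGetD arr mid 0 < target ∧ PySem.List.pyGetD arr (mid + 1) 0 > target then mid
    else if mid + 1 = (arr.length : Int) ∧ PySem.List.pyGetD arr mid 0 ≤ target then mid
    else if PySem.List.pyGetD arr mid 0 < target then pvALoop arr target (mid + 1) hi
    else pvALoop arr target lo (mid - 1)
  else -1
termination_by (hi + 1 - lo).toNat
decreasing_by
  · have h2 : PySem.Int.floordiv (hi - lo) 2 = (hi - lo) / 2 :=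
      PySem.Int.floordiv_eq_ediv_of_pos (by omega)
    simp only [h2]; omega
  · have h2 : PySem.Int.floordiv (hi - lo) 2 = (hi - lo) / 2 :=
      PySem.Int.floordiv_eq_ediv_of_pos (by omega)
    simp only [h2]; omega

def specialBinarySearch (arr : List Int) (target : Int) : Int :=
  pvALoop arr target 0 ((arr.length : Int) - 1)

-- ===== PORT B =====
-- B's inner recursive function go(lo, hi).
def pvGo (arr : List Int) (target lo hi : Int) : Int :=
  if _h : lo > hi then -1
  else
    let mid := PySem.Int.floordiv (lo + hi) 2
    let v := PySem.List.pyGetD arr mid 0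
    if v = target then mid
    else if v < target then
      if mid + 1 = (arr.length : Int) ∨ PySem.List.pyGetD arr (mid + 1) 0 > target then mid
      else pvGo arr target (mid + 1) hi
    else pvGo arr target lo (mid - 1)
termination_by (hi + 1 - lo).toNat
decreasing_by
  · have hb := PySem.Int.floordiv_two_mid_bounds (lo := lo) (hi := hi) (by omega)
    omega
  · have hb := PySem.Int.floordiv_two_mid_bounds (lo := lo) (hi := hi) (by omega)
    omega

def specialBinarySearch_alt (arr : List Int) (target : Int) : Int :=
  pvGo arr target 0 ((arr.length : Int) - 1)

-- ===== PRECONDITION & SPEC =====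
def Spec_specialBinarySearch (arr : List Int) (target : Int) (out : Int) : Prop := out = specialBinarySearch_alt arr target
instance (arr : List Int) (target : Int) (out : Int) : Decidable (Spec_specialBinarySearch arr target out) := by unfold Spec_specialBinarySearch; infer_instance

-- ===== CLAIM (what is proved, stated in full; the proofs are below) =====
def Claim_equal_specialBinarySearch : Prop := ∀ (arr : List Int) (target : Int), Dom_specialBinarySearch arr target → Spec_specialBinarySearch arr target (specialBinarySearch arr target)

-- ===== LEMMAS AND PROOFS =====

-- Both midpoint formulas agree: lo + (hi - lo)//2 = (lo + hi)//2.
theorem pvMid_eq (lo hi : Int) (h : lo ≤ hi) :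
    lo + PySem.Int.floordiv (hi - lo) 2 = PySem.Int.floordiv (lo + hi) 2 := by
  rw [PySem.Int.floordiv_eq_ediv_of_pos (a := hi - lo) (by omega),
      PySem.Int.floordiv_eq_ediv_of_pos (a := lo + hi) (by omega)]
  omega

-- Core invariant: on in-range search windows the loop and the recursion agree.
theorem pvALoop_eq_pvGo (arr : List Int) (target : Int) :
    ∀ (n : Nat) (lo hi : Int), (hi + 1 - lo).toNat ≤ n → 0 ≤ lo → hi < (arr.length : Int) →
      pvALoop arr target lo hi = pvGo arr target lo hi := by
  intro n
  induction n with
  | zero =>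
    intro lo hi hn hlo hhi
    rw [pvALoop, pvGo]
    have : ¬ lo ≤ hi := by omega
    simp [this, show lo > hi by omega]
  | succ n ih =>
    intro lo hi hn hlo hhi
    rw [pvALoop, pvGo]
    by_cases hle : lo ≤ hi
    · have hgt : ¬ lo > hi := by omega
      simp only [hle, hgt, dif_pos, dif_neg, not_false_iff]
      have hmid := pvMid_eq lo hi hle
      set mid := lo + PySem.Int.floordiv (hi - lo) 2 with hmiddef
      have hbounds : lo ≤ mid ∧ mid ≤ hi := by
        rw [hmid]; exact PySem.Int.floordiv_two_mid_bounds hle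
      rw [← hmid]
      by_cases h1 : PySem.List.pyGetD arr mid 0 = target
      · simp [h1]
      · simp only [h1, if_false]
        by_cases hlt : PySem.List.pyGetD arr mid 0 < target
        · -- arr[mid] < target
          by_cases hlast : mid + 1 = (arr.length : Int)
          · -- last index: A's third branch, B's first disjunct
            have h2 : ¬ (mid + 1 < (arr.length : Int) ∧ PySem.List.pyGetD arr mid 0 < target ∧ PySem.List.pyGetD arr (mid + 1) 0 > target) := by
              intro ⟨hc, _⟩; omega
            simp [h2, hlast, le_of_lt hlt, hlt]
          · have hmidlt : mid + 1 < (arr.length : Int) := by omega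
            have h3 : ¬ (mid + 1 = (arr.length : Int) ∧ PySem.List.pyGetD arr mid 0 ≤ target) := by
              intro ⟨hc, _⟩; exact hlast hc
            by_cases hnext : PySem.List.pyGetD arr (mid + 1) 0 > target
            · simp [hmidlt, hlt, hnext, hlast]
            · have h2 : ¬ (mid + 1 < (arr.length : Int) ∧ PySem.List.pyGetD arr mid 0 < target ∧ PySem.List.pyGetD arr (mid + 1) 0 > target) := by
                intro ⟨_, _, hc⟩; exact hnext hc
              simp [h2, h3, hlt, hlast, hnext]
              exact ih (mid + 1) hi (by omega) (by omega) hhi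
        · -- arr[mid] > target
          have h2 : ¬ (mid + 1 < (arr.length : Int) ∧ PySem.List.pyGetD arr mid 0 < target ∧ PySem.List.pyGetD arr (mid + 1) 0 > target) := by
            intro ⟨_, hc, _⟩; exact hlt hc
          have h3 : ¬ (mid + 1 = (arr.length : Int) ∧ PySem.List.pyGetD arr mid 0 ≤ target) := by
            intro ⟨_, hc⟩
            exact h1 (le_antisymm hc (not_lt.mp hlt))
          simp [h2, h3, hlt]
          exact ih lo (mid - 1) (by omega) hlo (by omega)

    · have hgt : lo > hi := by omega
      simp [hle, hgt]

-- ===== VERDICT (by name: the statement is the Claim_ definition above) =====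
theorem specialBinarySearch_spec : Claim_equal_specialBinarySearch := by
  intro arr target _
  unfold Spec_specialBinarySearch specialBinarySearch specialBinarySearch_alt
  exact pvALoop_eq_pvGo arr target ((arr.length : Int)).toNat 0 ((arr.length : Int) - 1)
    (by omega) (by omega) (by omega)
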